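-- pv_equiv track=rewrite | github.com/Xiexueheng/machine-translation-classification | preprocess.py | translate_to_integer
-- ===== SOURCE A (Python) =====
-- from collections import defaultdict
--
-- N_TOKENS = 5000
--
-- def translate_to_integer(data):
--     word_to_idx = defaultdict(int)
--     idx = 0
--     result = []
--
--     for sample in data:
--         in_text = sample[0]
--         label = sample[1]
--         in_text_ints = []
--
--         for word in in_text.split():
--             if word not in word_to_idx and idx <= N_TOKENS:
--                 # this way unknowns all automatically get assigned to '0'
--                 idx += 1
--                 word_to_idx[word] = idx
--
--             if (
--                 word_to_idx[word] != 0
--             ):  # temporary measure while I figure out what to do with unknowns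
--                 in_text_ints.append(word_to_idx[word])
--
--         result.append([in_text_ints, label])
--
--     return result
-- ===== SOURCE B (Python) =====
-- N_TOKENS = 5000
--
-- def translate_to_integer(data):
--     # pass 1: build the vocabulary (first-appearance order, same 1..N_TOKENS+1 cap as A)
--     vocab = {}
--     for sample in data:
--         for word in sample[0].split():
--             if word not in vocab and len(vocab) <= N_TOKENS:
--                 vocab[word] = len(vocab) + 1
--     # pass 2: encode every sample against the finished vocabulary
--     return [[[vocab[w] for w in sample[0].split() if w in vocab], sample[1]]
--             for sample in data]
-- ===== Notes on version B (the rewrite author's own statement) =====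
-- stated objective: alternative
-- what changed: A interleaves vocabulary assignment and encoding in one pass over an evolving defaultdict; B decomposes into two passes: first build the whole word-to-id index (same first-appearance order and idx<=N_TOKENS cap), then encode every sample against the finished index, dropping words that never got an id.
import Mathlib
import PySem

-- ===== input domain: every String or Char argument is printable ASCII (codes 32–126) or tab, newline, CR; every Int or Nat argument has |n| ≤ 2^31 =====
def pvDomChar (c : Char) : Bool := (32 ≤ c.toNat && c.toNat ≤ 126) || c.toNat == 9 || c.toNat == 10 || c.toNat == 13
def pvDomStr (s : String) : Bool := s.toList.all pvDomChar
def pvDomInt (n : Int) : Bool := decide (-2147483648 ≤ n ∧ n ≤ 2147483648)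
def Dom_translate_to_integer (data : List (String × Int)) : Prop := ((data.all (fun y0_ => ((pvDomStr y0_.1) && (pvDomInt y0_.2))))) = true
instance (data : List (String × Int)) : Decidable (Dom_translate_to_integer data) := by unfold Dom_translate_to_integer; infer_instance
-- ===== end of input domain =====

-- B replaces A's interleaved assign-and-encode single pass by a build-vocabulary-then-encode
-- two-pass decomposition; same cost, proved to return the same value on every input.


def N_TOKENS : Int := 5000

-- ===== PORT A =====
-- state: (word_to_idx, idx, in_text_ints); the defaultdict lookup word_to_idx[word]
-- inserts the default 0 when the key is absent, which the d2 step models.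
def aWordStep (s : PySem.Dict String Int × Int × List Int) (word : String) :
    PySem.Dict String Int × Int × List Int :=
  let d := s.1
  let idx := s.2.1
  let d1 := if !d.contains word && decide (idx ≤ N_TOKENS) then d.insert word (idx + 1) else d
  let idx1 := if !d.contains word && decide (idx ≤ N_TOKENS) then idx + 1 else idx
  let d2 := if d1.contains word then d1 else d1.insert word 0
  let ints1 := if d2.getD word 0 ≠ 0 then s.2.2 ++ [d2.getD word 0] else s.2.2
  (d2, idx1, ints1)

def aSampleStep (s : PySem.Dict String Int × Int × List (List Int × Int)) (sample : String × Int) :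
    PySem.Dict String Int × Int × List (List Int × Int) :=
  let r := (PySem.Str.split₀ sample.1).foldl aWordStep (s.1, s.2.1, [])
  (r.1, r.2.1, s.2.2 ++ [(r.2.2, sample.2)])

def translate_to_integer (data : List (String × Int)) : List (List Int × Int) :=
  (data.foldl aSampleStep (PySem.Dict.empty, 0, [])).2.2

-- ===== PORT B =====
def bVocabWord (v : PySem.Dict String Int) (word : String) : PySem.Dict String Int :=
  if !v.contains word && decide ((v.size : Int) ≤ N_TOKENS) then
    v.insert word ((v.size : Int) + 1)
  else v

def bVocab (v : PySem.Dict String Int) (data : List (String × Int)) : PySem.Dict String Int :=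
  data.foldl (fun v sample => (PySem.Str.split₀ sample.1).foldl bVocabWord v) v

def bEncodeList (v : PySem.Dict String Int) (ws : List String) : List Int :=
  (ws.filter (fun w => v.contains w)).map (fun w => v.getD w 0)

def translate_to_integer_alt (data : List (String × Int)) : List (List Int × Int) :=
  let vocab := bVocab PySem.Dict.empty data
  data.map (fun sample => (bEncodeList vocab (PySem.Str.split₀ sample.1), sample.2))

-- ===== PRECONDITION & SPEC =====
def Spec_translate_to_integer (data : List (String × Int)) (out : List (List Int × Int)) : Prop := out = translate_to_integer_alt data
instance (data : List (String × Int)) (out : List (List Int × Int)) : Decidable (Spec_translate_to_integer data out) := by unfold Spec_translate_to_integer; infer_instance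

-- ===== CLAIM (what is proved, stated in full; the proofs are below) =====
def Claim_equal_translate_to_integer : Prop := ∀ (data : List (String × Int)), Dom_translate_to_integer data → Spec_translate_to_integer data (translate_to_integer data)

-- ===== LEMMAS AND PROOFS =====

-- Invariant tying A's evolving (word_to_idx, idx) to B's vocabulary v:
-- idx counts v's entries, nonzero entries of A's dict are exactly v's entries,
-- and a zero (defaultdict) entry can only exist once the cap was exceeded.
def StInv (d v : PySem.Dict String Int) (idx : Int) : Prop :=
  idx = (v.size : Int) ∧
  (∀ w k, v.get? w = some k ↔ (d.get? w = some k ∧ k ≠ 0)) ∧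
  (∀ w, d.get? w = some 0 → N_TOKENS < idx)

-- v grows into V without touching existing ids; once over the cap it is frozen.
def Mono (v V : PySem.Dict String Int) : Prop :=
  (∀ w k, v.get? w = some k → V.get? w = some k) ∧ (N_TOKENS < (v.size : Int) → V = v)

theorem mono_refl (v : PySem.Dict String Int) : Mono v v := ⟨fun _ _ h => h, fun _ => rfl⟩

theorem mono_trans {u v V : PySem.Dict String Int} (h1 : Mono u v) (h2 : Mono v V) : Mono u V := by
  refine ⟨fun w k h => h2.1 w k (h1.1 w k h), fun hc => ?_⟩
  have hv : v = u := h1.2 hc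
  have : V = v := h2.2 (by rw [hv]; exact hc)
  rw [this, hv]

theorem mono_word (v : PySem.Dict String Int) (w : String) : Mono v (bVocabWord v w) := by
  unfold bVocabWord
  by_cases hc : v.contains w = true
  · simp [hc, mono_refl]
  · by_cases hs : (v.size : Int) ≤ N_TOKENS
    · simp only [hc, hs, Bool.not_false, decide_true, Bool.and_self, if_pos]
      refine ⟨fun w' k h => ?_, fun hbig => absurd hs (not_le.mpr hbig)⟩
      have hne : w' ≠ w := by
        intro he; subst he
        exact hc (by simp [PySem.Dict.contains_eq_isSome_get?, h])
      rw [PySem.Dict.get?_insert_of_ne _ _ hne]; exact h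
    · simp [hc, hs, mono_refl]

theorem mono_words (v : PySem.Dict String Int) (ws : List String) :
    Mono v (ws.foldl bVocabWord v) := by
  induction ws generalizing v with
  | nil => exact mono_refl v
  | cons w rest ih => exact mono_trans (mono_word v w) (ih (bVocabWord v w))

theorem mono_bVocab (v : PySem.Dict String Int) (data : List (String × Int)) :
    Mono v (bVocab v data) := by
  induction data generalizing v with
  | nil => exact mono_refl v
  | cons s rest ih =>
    exact mono_trans (mono_words v (PySem.Str.split₀ s.1)) (ih _)

theorem inv_empty : StInv PySem.Dict.empty PySem.Dict.empty 0 := by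
  refine ⟨by simp [PySem.Dict.size_empty], fun w k => ?_, fun w h => ?_⟩
  · simp [PySem.Dict.get?_empty]
  · simp [PySem.Dict.get?_empty] at h

-- one word: the invariant is preserved, and the emitted id (if any) is the one any
-- monotone extension V of the new vocabulary assigns to the word.
theorem word_step (d v : PySem.Dict String Int) (idx : Int) (ints : List Int) (w : String)
    (h : StInv d v idx) :
    StInv (aWordStep (d, idx, ints) w).1 (bVocabWord v w) (aWordStep (d, idx, ints) w).2.1 ∧
    ∀ V, Mono (bVocabWord v w) V →
      (aWordStep (d, idx, ints) w).2.2 =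
        ints ++ (if V.contains w then [V.getD w 0] else []) := by
  obtain ⟨hsz, hiff, hzero⟩ := h
  have hidx0 : 0 ≤ idx := by rw [hsz]; exact_mod_cast Nat.zero_le _
  by_cases hc : d.contains w = true
  · -- word already in A's dict
    have hvs : (d.get? w).isSome := by rw [← PySem.Dict.contains_eq_isSome_get?]; exact hc
    obtain ⟨k, hk⟩ := Option.isSome_iff_exists.mp hvs
    have hA : aWordStep (d, idx, ints) w =
        (d, idx, if d.getD w 0 ≠ 0 then ints ++ [d.getD w 0] else ints) := by
      unfold aWordStep; simp [hc]
    rw [hA]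
    by_cases hk0 : k = 0
    · -- zero entry: over cap, word not in vocab, V frozen
      subst hk0
      have hbig : N_TOKENS < idx := hzero w hk
      have hvw : v.get? w = none := by
        cases hv : v.get? w with
        | none => rfl
        | some k' =>
          have := (hiff w k').mp hv
          rw [hk] at this; exact absurd this.1.symm (by simp [this.2])
      have hvc : v.contains w = false := by
        rw [PySem.Dict.contains_eq_isSome_get?, hvw]; rfl
      have hbig' : N_TOKENS < (v.size : Int) := by rw [← hsz]; exact hbig
      have hstep : bVocabWord v w = v := by
        unfold bVocabWord; rw [hvc]
        simp [not_le.mpr hbig']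
      rw [hstep]
      refine ⟨⟨hsz, hiff, hzero⟩, fun V hM => ?_⟩
      have hVfrozen : V = v := hM.2 hbig'
      have hVc : V.contains w = false := by rw [hVfrozen]; exact hvc
      simp [PySem.Dict.getD_eq_get?_getD, hk, hVc]
    · -- nonzero entry k: in vocab with id k, V keeps it
      have hvw : v.get? w = some k := (hiff w k).mpr ⟨hk, hk0⟩
      have hvc : v.contains w = true := by
        rw [PySem.Dict.contains_eq_isSome_get?, hvw]; rfl
      have hstep : bVocabWord v w = v := by unfold bVocabWord; rw [hvc]; simp
      rw [hstep]
      refine ⟨⟨hsz, hiff, hzero⟩, fun V hM => ?_⟩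
      have hVw : V.get? w = some k := hM.1 w k hvw
      have hVc : V.contains w = true := by
        rw [PySem.Dict.contains_eq_isSome_get?, hVw]; rfl
      simp [PySem.Dict.getD_eq_get?_getD, hk, hk0, hVc, hVw]
  · -- word not yet in A's dict
    have hdw : d.get? w = none := by
      cases hd : d.get? w with
      | none => rfl
      | some k => exact absurd (by rw [PySem.Dict.contains_eq_isSome_get?, hd]; rfl) hc
    have hvw : v.get? w = none := by
      cases hv : v.get? w with
      | none => rfl
      | some k' => exact absurd ((hiff w k').mp hv).1 (by simp [hdw])
    have hvc : v.contains w = false := by rw [PySem.Dict.contains_eq_isSome_get?, hvw]; rfl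
    have hcf : d.contains w = false := by
      rw [PySem.Dict.contains_eq_isSome_get?, hdw]; rfl
    by_cases hle : idx ≤ N_TOKENS
    · -- cap not hit: both sides assign id idx+1
      have hle' : (v.size : Int) ≤ N_TOKENS := by rw [← hsz]; exact hle
      have hstep : bVocabWord v w = v.insert w (idx + 1) := by
        unfold bVocabWord; rw [hvc, hsz]
        simp [hle']
      have hA : aWordStep (d, idx, ints) w =
          (d.insert w (idx + 1), idx + 1, ints ++ [idx + 1]) := by
        unfold aWordStep
        simp only [hcf, Bool.not_false, hle, decide_true, Bool.and_self, if_true]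
        have h1 : (d.insert w (idx + 1)).contains w = true := PySem.Dict.contains_insert_self _ _ _
        rw [if_pos h1]
        have h2 : (d.insert w (idx + 1)).getD w 0 = idx + 1 := PySem.Dict.getD_insert_self _ _ _ _
        rw [h2, if_pos (by omega)]
      rw [hstep, hA]
      constructor
      · refine ⟨?_, fun w' k => ?_, fun w' hw' => ?_⟩
        · rw [PySem.Dict.size_insert, if_neg (by simp [hvc])]
          push_cast; omega
        · by_cases he : w' = w
          · subst he
            rw [PySem.Dict.get?_insert_self, PySem.Dict.get?_insert_self]
            constructor
            · rintro h; exact ⟨h, by cases h; omega⟩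
            · rintro ⟨h, _⟩; exact h
          · rw [PySem.Dict.get?_insert_of_ne _ _ he, PySem.Dict.get?_insert_of_ne _ _ he]
            exact hiff w' k
        · by_cases he : w' = w
          · subst he; rw [PySem.Dict.get?_insert_self] at hw'
            exact absurd hw' (by simp; omega)
          · rw [PySem.Dict.get?_insert_of_ne _ _ he] at hw'
            have := hzero w' hw'; omega
      · intro V hM
        have hVw : V.get? w = some (idx + 1) :=
          hM.1 w (idx + 1) (PySem.Dict.get?_insert_self _ _ _)
        have hVc : V.contains w = true := by
          rw [PySem.Dict.contains_eq_isSome_get?, hVw]; rfl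
        simp [hVc, PySem.Dict.getD_eq_get?_getD, hVw]
    · -- over the cap: A records a 0 (defaultdict), B never adds the word
      have hle' : ¬ ((v.size : Int) ≤ N_TOKENS) := by rw [← hsz]; exact hle
      have hstep : bVocabWord v w = v := by
        unfold bVocabWord; rw [hvc]
        simp [hle']
      have hA : aWordStep (d, idx, ints) w = (d.insert w 0, idx, ints) := by
        unfold aWordStep
        simp [hcf, hle, PySem.Dict.getD_insert_self]
      rw [hstep, hA]
      constructor
      · refine ⟨hsz, fun w' k => ?_, fun w' hw' => ?_⟩
        · by_cases he : w' = w
          · subst he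
            rw [PySem.Dict.get?_insert_self]
            simp only [hvw]
            constructor
            · rintro h; cases h
            · rintro ⟨h, hk⟩; cases h; simp at hk
          · rw [PySem.Dict.get?_insert_of_ne _ _ he]; exact hiff w' k
        · by_cases he : w' = w
          · exact not_le.mp hle
          · rw [PySem.Dict.get?_insert_of_ne _ _ he] at hw'
            exact hzero w' hw'
      · intro V hM
        have hVfrozen : V = v := hM.2 (by rw [← hsz]; exact not_le.mp hle)
        have hVc : V.contains w = false := by rw [hVfrozen]; exact hvc
        simp [hVc]

-- all words of one sample
theorem words_step (ws : List String) (d v : PySem.Dict String Int) (idx : Int) (ints : List Int)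
    (h : StInv d v idx) :
    StInv (ws.foldl aWordStep (d, idx, ints)).1 (ws.foldl bVocabWord v)
      (ws.foldl aWordStep (d, idx, ints)).2.1 ∧
    ∀ V, Mono (ws.foldl bVocabWord v) V →
      (ws.foldl aWordStep (d, idx, ints)).2.2 = ints ++ bEncodeList V ws := by
  induction ws generalizing d v idx ints with
  | nil => exact ⟨h, fun V _ => by simp [bEncodeList]⟩
  | cons w rest ih =>
    obtain ⟨hInv1, hout1⟩ := word_step d v idx ints w h
    simp only [List.foldl_cons]
    obtain ⟨hInv2, hout2⟩ := ih (aWordStep (d, idx, ints) w).1 (bVocabWord v w)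
      (aWordStep (d, idx, ints) w).2.1 (aWordStep (d, idx, ints) w).2.2 hInv1
    refine ⟨hInv2, fun V hM => ?_⟩
    have hM1 : Mono (bVocabWord v w) V := mono_trans (mono_words _ rest) hM
    rw [hout2 V hM, hout1 V hM1]
    simp only [bEncodeList, List.filter_cons]
    by_cases hVc : V.contains w = true
    · simp [hVc]
    · simp [Bool.eq_false_iff.mpr hVc]

-- all samples
theorem samples_step (rest : List (String × Int)) (d v : PySem.Dict String Int) (idx : Int)
    (acc : List (List Int × Int)) (h : StInv d v idx) :
    (rest.foldl aSampleStep (d, idx, acc)).2.2 =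
      acc ++ rest.map (fun s => (bEncodeList (bVocab v rest) (PySem.Str.split₀ s.1), s.2)) := by
  induction rest generalizing d v idx acc with
  | nil => simp
  | cons s rest' ih =>
    obtain ⟨hInv1, hout1⟩ := words_step (PySem.Str.split₀ s.1) d v idx [] h
    have hv1 : bVocab v (s :: rest') = bVocab ((PySem.Str.split₀ s.1).foldl bVocabWord v) rest' := rfl
    simp only [List.foldl_cons, aSampleStep]
    rw [ih _ _ _ _ hInv1]
    rw [hout1 (bVocab ((PySem.Str.split₀ s.1).foldl bVocabWord v) rest') (mono_bVocab _ _)]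
    simp [hv1]

-- ===== VERDICT (by name: the statement is the Claim_ definition above) =====
theorem translate_to_integer_spec : Claim_equal_translate_to_integer := by
  intro data _
  unfold Spec_translate_to_integer translate_to_integer translate_to_integer_alt
  rw [samples_step data PySem.Dict.empty PySem.Dict.empty 0 [] inv_empty]
  simp
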